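-- pv_equiv track=rewrite | github.com/arnabs542/m0vefast | Heap/kth/kthSmallestWith23.py | kthSmallest23
-- ===== SOURCE A (Python) =====
-- def kthSmallest23(k):
--     import heapq
--     heap = []
--     visited = set()
--
--     heapq.heappush(heap, 1)
--     visited.add(1)
--
--     while k > 1:
--         cur = heapq.heappop(heap)
--         if cur * 2 not in visited:
--             visited.add(cur * 2)
--             heapq.heappush(heap, cur * 2)
--         if cur * 3 not in visited:
--             visited.add(cur * 3)
--             heapq.heappush(heap, cur * 3)
--         k -= 1
--
--     return heapq.heappop(heap)
-- ===== SOURCE B (Python) =====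
-- def kthSmallest23(k):
--     # Two-pointer DP over the sequence itself: O(k), no heap, no set.
--     u = [1]
--     i2 = 0
--     i3 = 0
--     while len(u) < k:
--         nxt = min(2 * u[i2], 3 * u[i3])
--         u.append(nxt)
--         if nxt == 2 * u[i2]:
--             i2 += 1
--         if nxt == 3 * u[i3]:
--             i3 += 1
--     return u[-1]
-- ===== Notes on version B (the rewrite author's own statement) =====
-- stated objective: faster
-- what changed: Replaced the heap-plus-visited-set frontier exploration with the classic two-pointer dynamic program that merges the doubled and tripled subsequences of the list being built.
import Mathlib
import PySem

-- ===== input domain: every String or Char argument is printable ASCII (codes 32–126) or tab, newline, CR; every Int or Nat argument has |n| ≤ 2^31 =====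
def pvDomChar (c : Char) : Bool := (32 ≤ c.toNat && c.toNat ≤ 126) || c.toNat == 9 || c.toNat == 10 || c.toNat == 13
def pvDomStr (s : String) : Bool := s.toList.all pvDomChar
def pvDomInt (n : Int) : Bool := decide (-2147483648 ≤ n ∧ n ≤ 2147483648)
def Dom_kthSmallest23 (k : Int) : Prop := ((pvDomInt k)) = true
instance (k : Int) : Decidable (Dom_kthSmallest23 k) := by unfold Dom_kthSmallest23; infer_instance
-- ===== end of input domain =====

-- B replaces A's heap+visited-set frontier search by the classic two-pointer DP that merges the doubled and tripled subsequences (objective: faster).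

-- ===== PORT A =====
-- heapq on ints modeled as a mergeable min-heap (skew heap): heappush = insert, heappop = root + merge of children.
-- Exact for the sequence of popped values: heappop returns the minimum element of the heap, which is all A observes.
-- Python's set 'visited' is modeled as Std.TreeSet Int: exact for membership test and insertion, which is all A
-- observes of it (its iteration order is never used).
inductive IHeap where
  | nil : IHeap
  | node : Int → IHeap → IHeap → IHeap
deriving DecidableEq, Repr

def hSize : IHeap → Nat
  | .nil => 0
  | .node _ l r => hSize l + hSize r + 1

def hMerge : IHeap → IHeap → IHeap
  | .nil, t => t
  | t, .nil => t
  | .node x l r, .node y l' r' =>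
    if x ≤ y then .node x (hMerge r (.node y l' r')) l
    else .node y (hMerge r' (.node x l r)) l'
termination_by a b => hSize a + hSize b
decreasing_by
  all_goals simp [hSize]
  all_goals omega

-- heapq.heappush
def heapPush (h : IHeap) (x : Int) : IHeap := hMerge h (.node x .nil .nil)

-- root of the heap (= value returned by heappop); 0 only for the empty heap, which A never pops
def hPeek : IHeap → Int
  | .nil => 0
  | .node x _ _ => x

-- 'if cur*m not in visited: visited.add(cur*m); heapq.heappush(heap, cur*m)'
def pushNew (s : IHeap × Std.TreeSet Int) (x : Int) : IHeap × Std.TreeSet Int :=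
  if Std.TreeSet.contains s.2 x then s else (heapPush s.1 x, Std.TreeSet.insert s.2 x)

-- the 'while k > 1' loop; returns the final heap
def aLoop (k : Int) (heap : IHeap) (visited : Std.TreeSet Int) : IHeap :=
  if h : k > 1 then
    match heap with
    | .nil => .nil  -- heappop of an empty heap raises IndexError; unreachable here (the heap is never empty)
    | .node cur l r =>
      let s := pushNew (pushNew (hMerge l r, visited) (cur * 2)) (cur * 3)
      aLoop (k - 1) s.1 s.2
  else heap
termination_by (k - 1).toNat
decreasing_by omega

def kthSmallest23 (k : Int) : Int :=
  -- heap = [1]; visited = {1}; loop; final heappop returns the root of the (never empty) heap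
  hPeek (aLoop k (heapPush .nil 1) (Std.TreeSet.insert Std.TreeSet.empty 1))

-- ===== PORT B =====
-- 'while len(u) < k' loop of Source B; u[i2] / u[i3] read with getD (both pointers are always in range)
def bLoop (k : Int) (u : List Int) (i2 i3 : Nat) : List Int :=
  if h : (u.length : Int) < k then
    let nxt := min (2 * u.getD i2 0) (3 * u.getD i3 0)
    let i2' := if nxt = 2 * u.getD i2 0 then i2 + 1 else i2
    let i3' := if nxt = 3 * u.getD i3 0 then i3 + 1 else i3
    bLoop k (u ++ [nxt]) i2' i3'
  else u
termination_by (k - u.length).toNat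
decreasing_by simp only [List.length_append, List.length_cons, List.length_nil]; omega

def kthSmallest23_alt (k : Int) : Int :=
  (bLoop k [1] 0 0).getLastD 0  -- u[-1]; u is never empty

-- ===== PRECONDITION & SPEC =====
def Spec_kthSmallest23 (k : Int) (out : Int) : Prop := out = kthSmallest23_alt k
instance (k : Int) (out : Int) : Decidable (Spec_kthSmallest23 k out) := by unfold Spec_kthSmallest23; infer_instance

-- ===== CLAIM (what is proved, stated in full; the proofs are below) =====
def Claim_equal_kthSmallest23 : Prop := ∀ (k : Int), Dom_kthSmallest23 k → Spec_kthSmallest23 k (kthSmallest23 k)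

-- ===== LEMMAS AND PROOFS =====

-- multiplicity of x in a heap
def hCnt : IHeap → Int → Nat
  | .nil, _ => 0
  | .node y l r, x => (if y = x then 1 else 0) + hCnt l x + hCnt r x

-- heap-order: every node is ≤ its descendants
def HO : IHeap → Prop
  | .nil => True
  | .node x l r => (∀ y, 0 < hCnt l y → x ≤ y) ∧ (∀ y, 0 < hCnt r y → x ≤ y) ∧ HO l ∧ HO r

lemma hCnt_merge (a b : IHeap) (x : Int) : hCnt (hMerge a b) x = hCnt a x + hCnt b x := by
  fun_induction hMerge a b with
  | case1 t => simp [hCnt]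
  | case2 t => simp [hCnt]
  | case3 x' l r y l' r' hxy ih => simp [hCnt, ih]; omega
  | case4 x' l r y l' r' hxy ih => simp [hCnt, ih]; omega

lemma HO_merge (a b : IHeap) : HO a → HO b → HO (hMerge a b) := by
  fun_induction hMerge a b with
  | case1 t => intro _ hb; exact hb
  | case2 t => intro ha _; exact ha
  | case3 x l r y l' r' hxy ih =>
      intro ha hb
      obtain ⟨hal, har, hl, hr⟩ := ha
      obtain ⟨hbl, hbr, hl', hr'⟩ := hb
      refine ⟨?_, hal, ih hr ⟨hbl, hbr, hl', hr'⟩, hl⟩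
      intro z hz
      rw [hCnt_merge] at hz
      rcases Nat.lt_of_lt_of_le hz (le_refl _) with _
      by_cases hzr : 0 < hCnt r z
      · exact har z hzr
      · have hz' : 0 < hCnt (IHeap.node y l' r') z := by omega
        simp only [hCnt] at hz'
        by_cases hyz : y = z
        · omega
        · have : 0 < hCnt l' z ∨ 0 < hCnt r' z := by
            simp [hyz] at hz'; omega
          rcases this with h | h
          · exact le_trans hxy (hbl z h)
          · exact le_trans hxy (hbr z h)
  | case4 x l r y l' r' hxy ih =>
      intro ha hb
      obtain ⟨hal, har, hl, hr⟩ := ha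
      obtain ⟨hbl, hbr, hl', hr'⟩ := hb
      have hyx : y ≤ x := by omega
      refine ⟨?_, hbl, ih hr' ⟨hal, har, hl, hr⟩, hl'⟩
      intro z hz
      rw [hCnt_merge] at hz
      by_cases hzr : 0 < hCnt r' z
      · exact hbr z hzr
      · have hz' : 0 < hCnt (IHeap.node x l r) z := by omega
        simp only [hCnt] at hz'
        by_cases hxz : x = z
        · omega
        · have : 0 < hCnt l z ∨ 0 < hCnt r z := by
            simp [hxz] at hz'; omega
          rcases this with h | h
          · exact le_trans hyx (hal z h)
          · exact le_trans hyx (har z h)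

lemma hCnt_heapPush (h : IHeap) (x y : Int) :
    hCnt (heapPush h x) y = hCnt h y + (if x = y then 1 else 0) := by
  simp [heapPush, hCnt_merge, hCnt]

lemma HO_heapPush (h : IHeap) (x : Int) (hh : HO h) : HO (heapPush h x) := by
  refine HO_merge _ _ hh ?_
  refine ⟨?_, ?_, trivial, trivial⟩ <;> (intro y hy; simp [hCnt] at hy)

-- the candidate set held by A's heap, described through B's state (u, i2, i3)
def SMem (u : List Int) (i2 i3 : Nat) (x : Int) : Prop :=
  (∃ i, i2 ≤ i ∧ i < u.length ∧ x = 2 * u.getD i 0) ∨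
  (∃ j, i3 ≤ j ∧ j < u.length ∧ x = 3 * u.getD j 0)

-- bisimulation invariant between A's (heap, visited) and B's (u, i2, i3)
def BisimInv (heap : IHeap) (visited : Std.TreeSet Int) (u : List Int) (i2 i3 : Nat) : Prop :=
  u ≠ [] ∧ u.Pairwise (· < ·) ∧ (∀ y ∈ u, 1 ≤ y) ∧
  i2 < u.length ∧ i3 < u.length ∧
  HO heap ∧ (∀ x, hCnt heap x ≤ 1) ∧
  (∀ x, 0 < hCnt heap x → ∀ y ∈ u, y < x) ∧
  (∀ x, 0 < hCnt heap x ↔ SMem u i2 i3 x) ∧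
  (∀ x, x ∈ visited ↔ x ∈ u ∨ 0 < hCnt heap x)

-- Python-set facts for Std.TreeSet over Int
lemma treeMemInsert (t : Std.TreeSet Int) (x y : Int) : x ∈ t.insert y ↔ x ∈ t ∨ x = y := by
  rw [Std.TreeSet.mem_insert]
  constructor
  · rintro (h | h)
    · exact Or.inr (compare_eq_iff_eq.mp h).symm
    · exact Or.inl h
  · rintro (h | rfl)
    · exact Or.inr h
    · exact Or.inl (compare_eq_iff_eq.mpr rfl)

lemma treeContainsIff (t : Std.TreeSet Int) (x : Int) : t.contains x = true ↔ x ∈ t :=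
  Std.TreeSet.contains_iff_mem ..

lemma getD_lt_getD (u : List Int) (hp : u.Pairwise (· < ·)) {i j : Nat}
    (hij : i < j) (hj : j < u.length) : u.getD i 0 < u.getD j 0 := by
  have hi : i < u.length := lt_trans hij hj
  rw [List.getD_eq_getElem u 0 hi, List.getD_eq_getElem u 0 hj]
  exact List.pairwise_iff_getElem.1 hp i j hi hj hij

lemma getD_le_getD (u : List Int) (hp : u.Pairwise (· < ·)) {i j : Nat}
    (hij : i ≤ j) (hj : j < u.length) : u.getD i 0 ≤ u.getD j 0 := by
  rcases Nat.lt_or_ge i j with h | h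
  · exact le_of_lt (getD_lt_getD u hp h hj)
  · have : i = j := le_antisymm hij h
    simp [this]

-- unfolding lemmas for the two loops
lemma aLoop_stop (k : Int) (heap : IHeap) (visited : Std.TreeSet Int) (hk : ¬ k > 1) :
    aLoop k heap visited = heap := by
  rw [aLoop.eq_def]; simp [hk]

lemma aLoop_cons (k : Int) (cur : Int) (l r : IHeap) (visited : Std.TreeSet Int) (hk : k > 1) :
    aLoop k (.node cur l r) visited =
      aLoop (k - 1) (pushNew (pushNew (hMerge l r, visited) (cur * 2)) (cur * 3)).1
        (pushNew (pushNew (hMerge l r, visited) (cur * 2)) (cur * 3)).2 := by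
  rw [aLoop.eq_def]; simp [hk]

lemma bLoop_stop (k : Int) (u : List Int) (i2 i3 : Nat) (hk : ¬ (u.length : Int) < k) :
    bLoop k u i2 i3 = u := by
  rw [bLoop]; simp [hk]

lemma bLoop_step (k : Int) (u : List Int) (i2 i3 : Nat) (hk : (u.length : Int) < k) :
    bLoop k u i2 i3 =
      bLoop k (u ++ [min (2 * u.getD i2 0) (3 * u.getD i3 0)])
        (if min (2 * u.getD i2 0) (3 * u.getD i3 0) = 2 * u.getD i2 0 then i2 + 1 else i2)
        (if min (2 * u.getD i2 0) (3 * u.getD i3 0) = 3 * u.getD i3 0 then i3 + 1 else i3) := by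
  rw [bLoop]; simp [hk]

-- one side (multiplier c, pointer p) of the candidate-set update
lemma side_iff (u : List Int) (hup : u.Pairwise (· < ·)) (cur c : Int) (hcpos : 0 < c)
    (p : Nat) (hp : p < u.length) (hcle : cur ≤ c * u.getD p 0) (x : Int) :
    (∃ i, (if cur = c * u.getD p 0 then p + 1 else p) ≤ i ∧ i < (u ++ [cur]).length ∧
        x = c * (u ++ [cur]).getD i 0)
    ↔ (x = cur * c ∨ ((∃ i, p ≤ i ∧ i < u.length ∧ x = c * u.getD i 0) ∧ x ≠ cur)) := by
  have hlen : (u ++ [cur]).length = u.length + 1 := by simp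
  have hgn : (u ++ [cur]).getD u.length 0 = cur := by
    rw [List.getD_append_right u [cur] 0 u.length (le_refl _)]
    simp
  have hgi : ∀ i, i < u.length → (u ++ [cur]).getD i 0 = u.getD i 0 := by
    intro i hi; exact List.getD_append u [cur] 0 i hi
  constructor
  · rintro ⟨i, hge, hlt, rfl⟩
    rw [hlen] at hlt
    rcases Nat.lt_or_ge i u.length with hi | hi
    · right
      have hbound : (if cur = c * u.getD p 0 then p + 1 else p) ≤ i := hge
      have hple : p ≤ i := by split_ifs at hbound <;> omega
      refine ⟨⟨i, hple, hi, by rw [hgi i hi]⟩, ?_⟩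
      rw [hgi i hi]
      split_ifs at hbound with hcase
      · have : u.getD p 0 < u.getD i 0 := getD_lt_getD u hup (by omega) hi
        have := mul_lt_mul_of_pos_left this hcpos
        omega
      · intro hxc
        rcases Nat.lt_or_ge p i with hpi | hpi
        · have : u.getD p 0 < u.getD i 0 := getD_lt_getD u hup hpi hi
          have := mul_lt_mul_of_pos_left this hcpos
          omega
        · have : p = i := by omega
          exact hcase (by rw [this]; omega)
    · have : i = u.length := by omega
      subst this
      left; rw [hgn]; ring
  · rintro (rfl | ⟨⟨i, hple, hi, rfl⟩, hne⟩)
    · refine ⟨u.length, ?_, by omega, by rw [hgn]; ring⟩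
      split_ifs <;> omega
    · refine ⟨i, ?_, by omega, by rw [hgi i hi]⟩
      split_ifs with hcase
      · rcases Nat.lt_or_ge p i with h' | h'
        · omega
        · have : p = i ∨ i < p := by omega
          rcases this with rfl | h''
          · exact absurd hcase.symm hne
          · omega
      · exact hple

-- the single-step bisimulation
set_option maxHeartbeats 1000000 in
lemma step (heap : IHeap) (visited : Std.TreeSet Int) (u : List Int) (i2 i3 : Nat)
    (hInv : BisimInv heap visited u i2 i3) :
    ∃ l r, heap = .node (min (2 * u.getD i2 0) (3 * u.getD i3 0)) l r ∧
      BisimInv (pushNew (pushNew (hMerge l r, visited) ((min (2 * u.getD i2 0) (3 * u.getD i3 0)) * 2))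
            ((min (2 * u.getD i2 0) (3 * u.getD i3 0)) * 3)).1
          (pushNew (pushNew (hMerge l r, visited) ((min (2 * u.getD i2 0) (3 * u.getD i3 0)) * 2))
            ((min (2 * u.getD i2 0) (3 * u.getD i3 0)) * 3)).2
          (u ++ [min (2 * u.getD i2 0) (3 * u.getD i3 0)])
          (if min (2 * u.getD i2 0) (3 * u.getD i3 0) = 2 * u.getD i2 0 then i2 + 1 else i2)
          (if min (2 * u.getD i2 0) (3 * u.getD i3 0) = 3 * u.getD i3 0 then i3 + 1 else i3) := by
  obtain ⟨hne, hup, hpos, hi2, hi3, hho, hnd, hgt, hmem, hvis⟩ := hInv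
  have f1 : 0 < hCnt heap (2 * u.getD i2 0) := (hmem _).2 (Or.inl ⟨i2, le_refl _, hi2, rfl⟩)
  have f2 : 0 < hCnt heap (3 * u.getD i3 0) := (hmem _).2 (Or.inr ⟨i3, le_refl _, hi3, rfl⟩)
  obtain ⟨cur, l, r, rfl⟩ : ∃ cur l r, heap = .node cur l r := by
    cases heap with
    | nil => simp [hCnt] at f1
    | node a b c => exact ⟨a, b, c, rfl⟩
  obtain ⟨hol, hor, hl, hr⟩ := hho
  have hcnt_node : ∀ x, hCnt (IHeap.node cur l r) x
      = (if cur = x then 1 else 0) + hCnt l x + hCnt r x := fun x => rfl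
  have hcnt_rest : ∀ x, hCnt (hMerge l r) x = hCnt l x + hCnt r x := fun x => hCnt_merge l r x
  -- the root is ≤ every element
  have hcur_le : ∀ x, 0 < hCnt (IHeap.node cur l r) x → cur ≤ x := by
    intro x hx
    rw [hcnt_node] at hx
    by_cases hcx : cur = x
    · omega
    · have : 0 < hCnt l x ∨ 0 < hCnt r x := by simp [hcx] at hx; omega
      rcases this with h | h
      · exact hol x h
      · exact hor x h
  have hcur_mem : 0 < hCnt (IHeap.node cur l r) cur := by rw [hcnt_node]; simp
  have hcurS : SMem u i2 i3 cur := (hmem cur).1 hcur_mem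
  have hc : cur = min (2 * u.getD i2 0) (3 * u.getD i3 0) := by
    have le1 : cur ≤ 2 * u.getD i2 0 := hcur_le _ f1
    have le2 : cur ≤ 3 * u.getD i3 0 := hcur_le _ f2
    have ge : min (2 * u.getD i2 0) (3 * u.getD i3 0) ≤ cur := by
      rcases hcurS with ⟨i, hle, hi, rfl⟩ | ⟨j, hle, hj, rfl⟩
      · calc min (2 * u.getD i2 0) (3 * u.getD i3 0) ≤ 2 * u.getD i2 0 := min_le_left _ _
          _ ≤ 2 * u.getD i 0 := by
              have := getD_le_getD u hup hle hi; omega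
      · calc min (2 * u.getD i2 0) (3 * u.getD i3 0) ≤ 3 * u.getD i3 0 := min_le_right _ _
          _ ≤ 3 * u.getD j 0 := by
              have := getD_le_getD u hup hle hj; omega
    exact le_antisymm (le_min le1 le2) ge
  refine ⟨l, r, by rw [hc], ?_⟩
  rw [← hc]
  -- basic bounds
  have hlt_u : ∀ y ∈ u, y < cur := hgt cur hcur_mem
  have hcur2 : 2 ≤ cur := by
    obtain ⟨y, hy⟩ := List.exists_mem_of_ne_nil u hne
    have := hpos y hy
    have := hlt_u y hy
    omega
  have hgD_mem : ∀ i, i < u.length → u.getD i 0 ∈ u := by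
    intro i hi; rw [List.getD_eq_getElem u 0 hi]; exact List.getElem_mem hi
  have hbnd3 : ∀ x, 0 < hCnt (IHeap.node cur l r) x → x < cur * 3 := by
    intro x hx
    rcases (hmem x).1 hx with ⟨i, _, hi, rfl⟩ | ⟨j, _, hj, rfl⟩
    · have := hlt_u _ (hgD_mem i hi); omega
    · have := hlt_u _ (hgD_mem j hj); omega
  have h2nu : cur * 2 ∉ u := by
    intro hx; have := hlt_u _ hx; omega
  have h3nu : cur * 3 ∉ u := by
    intro hx; have := hlt_u _ hx; omega
  have h3nheap : ¬ 0 < hCnt (IHeap.node cur l r) (cur * 3) := by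
    intro hx; have := hbnd3 _ hx; omega
  have h3nvis : cur * 3 ∉ visited := by
    intro hx; rcases (hvis _).1 hx with h | h
    · exact h3nu h
    · exact h3nheap h
  have hcur_nrest : hCnt (hMerge l r) cur = 0 := by
    have := hnd cur
    rw [hcnt_node] at this
    rw [hcnt_rest]
    simp at this
    omega
  have hrest_mem : ∀ x, 0 < hCnt (hMerge l r) x ↔ (0 < hCnt (IHeap.node cur l r) x ∧ x ≠ cur) := by
    intro x
    rw [hcnt_rest, hcnt_node]
    constructor
    · intro hx
      constructor
      · omega
      · intro hxe; subst hxe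
        rw [hcnt_rest] at hcur_nrest; omega
    · rintro ⟨hx, hne'⟩
      have : ¬ cur = x := fun h => hne' h.symm
      simp [this] at hx
      omega
  have hhead : ∀ y, 0 < hCnt (hMerge l r) y → cur < y := by
    intro y hy
    have h1 := hcur_le y ((hrest_mem y).1 hy).1
    have h2 := ((hrest_mem y).1 hy).2
    omega
  have hrest_nd : ∀ x, hCnt (hMerge l r) x ≤ 1 := by
    intro x
    have := hnd x
    rw [hcnt_node] at this
    rw [hcnt_rest]
    omega
  have hrest_ho : HO (hMerge l r) := HO_merge l r hl hr
  -- the common part: all that matters about the new heap and visited set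
  suffices H : ∀ (heap' : IHeap) (vis' : Std.TreeSet Int),
      HO heap' → (∀ x, hCnt heap' x ≤ 1) →
      (∀ x, 0 < hCnt heap' x ↔ x = cur * 2 ∨ x = cur * 3 ∨ 0 < hCnt (hMerge l r) x) →
      (∀ x, x ∈ vis' ↔ x ∈ visited ∨ x = cur * 2 ∨ x = cur * 3) →
      BisimInv heap' vis' (u ++ [cur])
        (if cur = 2 * u.getD i2 0 then i2 + 1 else i2)
        (if cur = 3 * u.getD i3 0 then i3 + 1 else i3) by
    by_cases hP : cur * 2 ∈ visited
    · -- cur*2 already present: first pushNew is the identity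
      have e1 : pushNew (hMerge l r, visited) (cur * 2) = (hMerge l r, visited) := by
        simp [pushNew, treeContainsIff, hP]
      have e2 : pushNew (hMerge l r, visited) (cur * 3)
          = (heapPush (hMerge l r) (cur * 3), Std.TreeSet.insert visited (cur * 3)) := by
        simp [pushNew, treeContainsIff, h3nvis]
      rw [e1, e2]
      have h2rest : 0 < hCnt (hMerge l r) (cur * 2) := by
        rcases (hvis _).1 hP with h | h
        · exact absurd h h2nu
        · exact (hrest_mem _).2 ⟨h, by omega⟩
      refine H _ _ (HO_heapPush _ _ hrest_ho) ?_ ?_ ?_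
      · intro x
        rw [hCnt_heapPush]
        have hr3 : hCnt (hMerge l r) (cur * 3) = 0 := by
          have hh : hCnt (IHeap.node cur l r) (cur * 3) = 0 := by omega
          rw [hcnt_node] at hh
          rw [hcnt_rest]
          split_ifs at hh <;> omega
        by_cases h3x : cur * 3 = x
        · subst h3x; simp [hr3]
        · simp [h3x]; exact hrest_nd x
      · intro x
        rw [hCnt_heapPush]
        constructor
        · intro hx
          by_cases h3x : cur * 3 = x
          · exact Or.inr (Or.inl h3x.symm)
          · simp [h3x] at hx; exact Or.inr (Or.inr hx)
        · rintro (rfl | rfl | hx)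
          · have := h2rest; omega
          · simp
          · omega
      · intro x
        rw [treeMemInsert]
        constructor
        · rintro (h | rfl) <;> tauto
        · rintro (h | rfl | rfl)
          · tauto
          · exact Or.inl hP
          · tauto
    · -- push cur*2, then cur*3
      have e1 : pushNew (hMerge l r, visited) (cur * 2)
          = (heapPush (hMerge l r) (cur * 2), Std.TreeSet.insert visited (cur * 2)) := by
        simp [pushNew, treeContainsIff, hP]
      have e2 : pushNew (heapPush (hMerge l r) (cur * 2), Std.TreeSet.insert visited (cur * 2)) (cur * 3)
          = (heapPush (heapPush (hMerge l r) (cur * 2)) (cur * 3),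
             Std.TreeSet.insert (Std.TreeSet.insert visited (cur * 2)) (cur * 3)) := by
        simp [pushNew, treeContainsIff, treeMemInsert, h3nvis,
          (show ¬ cur = 0 by omega)]
      rw [e1, e2]
      have h2nrest : hCnt (hMerge l r) (cur * 2) = 0 := by
        by_contra hcc
        exact hP ((hvis _).2 (Or.inr ((hrest_mem _).1 (by omega)).1))
      have h3nrest : hCnt (hMerge l r) (cur * 3) = 0 := by
        by_contra hcc
        exact h3nheap ((hrest_mem _).1 (by omega)).1
      refine H _ _ (HO_heapPush _ _ (HO_heapPush _ _ hrest_ho)) ?_ ?_ ?_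
      · intro x
        rw [hCnt_heapPush, hCnt_heapPush]
        have hnx := hrest_nd x
        have e2 := h2nrest
        have e3 := h3nrest
        by_cases h2x : cur * 2 = x
        · subst h2x; split_ifs <;> omega
        · by_cases h3x : cur * 3 = x
          · subst h3x; split_ifs <;> omega
          · split_ifs <;> omega
      · intro x
        rw [hCnt_heapPush, hCnt_heapPush]
        constructor
        · intro hx
          by_cases h2x : cur * 2 = x
          · exact Or.inl h2x.symm
          · by_cases h3x : cur * 3 = x
            · exact Or.inr (Or.inl h3x.symm)
            · rw [if_neg h2x, if_neg h3x] at hx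
              exact Or.inr (Or.inr (by omega))
        · rintro (rfl | rfl | hx) <;> split_ifs <;> omega
      · intro x
        rw [treeMemInsert, treeMemInsert]
        tauto
  -- now prove BisimInv for any heap'/vis' with those membership descriptions
  intro heap' vis' hho' hnd' hm' hv'
  have hlen : (u ++ [cur]).length = u.length + 1 := by simp
  refine ⟨by simp, ?_, ?_, ?_, ?_, hho', hnd', ?_, ?_, ?_⟩
  · rw [List.pairwise_append]
    exact ⟨hup, List.pairwise_singleton _ _, by
      intro a ha b hb
      rcases List.mem_singleton.1 hb with rfl
      exact hlt_u a ha⟩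
  · intro y hy
    rcases List.mem_append.1 hy with h | h
    · exact hpos y h
    · rcases List.mem_singleton.1 h with rfl; omega
  · rw [hlen]; split_ifs <;> omega
  · rw [hlen]; split_ifs <;> omega
  · -- everything in the new heap is above everything in u ++ [cur]
    intro x hx y hy
    have hyc : y ∈ u ∨ y = cur := by
      rcases List.mem_append.1 hy with h | h
      · exact Or.inl h
      · exact Or.inr (List.mem_singleton.1 h)
    have hylt : y ≤ cur := by
      rcases hyc with h | rfl
      · exact le_of_lt (hlt_u y h)
      · exact le_refl _
    rcases (hm' x).1 hx with rfl | rfl | h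
    · omega
    · omega
    · exact lt_of_le_of_lt hylt (hhead x h)
  · -- heap membership ↔ SMem of the new state
    intro x
    rw [hm' x, SMem]
    have s2 := side_iff u hup cur 2 (by omega) i2 hi2 (by rw [hc]; exact min_le_left _ _) x
    have s3 := side_iff u hup cur 3 (by omega) i3 hi3 (by rw [hc]; exact min_le_right _ _) x
    rw [s2, s3]
    have hrest_iff : 0 < hCnt (hMerge l r) x ↔ (SMem u i2 i3 x ∧ x ≠ cur) := by
      rw [hrest_mem x, hmem x]
    rw [hrest_iff, SMem]
    constructor
    · rintro (h | h | ⟨(hp | hq), hn⟩)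
      · exact Or.inl (Or.inl h)
      · exact Or.inr (Or.inl h)
      · exact Or.inl (Or.inr ⟨hp, hn⟩)
      · exact Or.inr (Or.inr ⟨hq, hn⟩)
    · rintro ((h | ⟨hp, hn⟩) | (h | ⟨hq, hn⟩))
      · exact Or.inl h
      · exact Or.inr (Or.inr ⟨Or.inl hp, hn⟩)
      · exact Or.inr (Or.inl h)
      · exact Or.inr (Or.inr ⟨Or.inr hq, hn⟩)
  · -- visited membership
    intro x
    rw [hv' x, hvis x]
    constructor
    · rintro ((h | h) | rfl | rfl)
      · exact Or.inl (List.mem_append.2 (Or.inl h))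
      · by_cases hxc : x = cur
        · exact Or.inl (List.mem_append.2 (Or.inr (by simp [hxc])))
        · exact Or.inr ((hm' _).2 (Or.inr (Or.inr ((hrest_mem x).2 ⟨h, hxc⟩))))
      · exact Or.inr ((hm' _).2 (Or.inl rfl))
      · exact Or.inr ((hm' _).2 (Or.inr (Or.inl rfl)))
    · rintro (h | h)
      · rcases List.mem_append.1 h with h' | h'
        · exact Or.inl (Or.inl h')
        · rcases List.mem_singleton.1 h' with rfl
          exact Or.inl (Or.inr hcur_mem)
      · rcases (hm' x).1 h with rfl | rfl | h'
        · exact Or.inr (Or.inl rfl)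
        · exact Or.inr (Or.inr rfl)
        · exact Or.inl (Or.inr ((hrest_mem x).1 h').1)

set_option maxHeartbeats 1000000 in
lemma loops_agree : ∀ (m : Nat) (j : Int), j = (m : Int) + 1 →
    ∀ (heap : IHeap) (visited : Std.TreeSet Int) (u : List Int) (i2 i3 : Nat),
    BisimInv heap visited u i2 i3 →
    hPeek (aLoop j heap visited) = (bLoop ((u.length : Int) + j) u i2 i3).getLastD 0 := by
  intro m
  induction m with
  | zero =>
      intro j hj heap visited u i2 i3 hInv
      obtain ⟨l, r, hheap, _⟩ := step heap visited u i2 i3 hInv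
      have hj1 : j = 1 := by omega
      subst hj1
      rw [aLoop_stop _ _ _ (by omega), hheap]
      rw [bLoop_step _ _ _ _ (by omega)]
      rw [bLoop_stop _ _ _ _ (by
        simp only [List.length_append, List.length_cons, List.length_nil]
        push_cast
        omega)]
      simp [hPeek]
  | succ m ih =>
      intro j hj heap visited u i2 i3 hInv
      obtain ⟨l, r, hheap, hInv'⟩ := step heap visited u i2 i3 hInv
      have hj2 : j > 1 := by omega
      rw [hheap, aLoop_cons _ _ _ _ _ hj2]
      rw [bLoop_step _ _ _ _ (by omega)]
      have hlen : ((u ++ [min (2 * u.getD i2 0) (3 * u.getD i3 0)]).length : Int) + (j - 1)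
          = (u.length : Int) + j := by
        simp only [List.length_append, List.length_cons, List.length_nil]
        push_cast
        omega
      rw [← hlen]
      exact ih (j - 1) (by omega) _ _ _ _ _ hInv'

lemma init_inv : BisimInv (.node 2 (.node 3 .nil .nil) .nil)
    (((Std.TreeSet.empty.insert 1).insert 2).insert 3) [1] 0 0 := by
  refine ⟨by simp, by simp, ?_, by simp, by simp, ?_, ?_, ?_, ?_, ?_⟩
  · intro y hy; simp at hy; omega
  · refine ⟨?_, ?_, ⟨?_, ?_, trivial, trivial⟩, trivial⟩
    · intro y hy
      by_cases h3 : (3 : Int) = y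
      · omega
      · simp [hCnt, h3] at hy
    all_goals (intro y hy; simp [hCnt] at hy)
  · intro x; simp [hCnt]; split_ifs <;> omega
  · intro x hx y hy
    simp at hy
    subst hy
    by_cases h2 : (2 : Int) = x
    · omega
    · by_cases h3 : (3 : Int) = x
      · omega
      · simp [hCnt, h2, h3] at hx
  · intro x
    simp only [SMem, List.length_singleton, Nat.lt_one_iff, hCnt]
    constructor
    · intro hx
      by_cases h2 : (2 : Int) = x
      · exact Or.inl ⟨0, le_refl _, rfl, by simp [← h2]⟩
      · by_cases h3 : (3 : Int) = x
        · exact Or.inr ⟨0, le_refl _, rfl, by simp [← h3]⟩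
        · simp [h2, h3] at hx
    · rintro (⟨i, -, rfl, rfl⟩ | ⟨j, -, rfl, rfl⟩) <;> simp
  · intro x
    rw [treeMemInsert, treeMemInsert, treeMemInsert]
    have hemp : ¬ x ∈ (Std.TreeSet.empty : Std.TreeSet Int) := Std.TreeSet.not_mem_of_isEmpty rfl
    simp only [List.mem_cons, List.not_mem_nil, or_false, hCnt]
    constructor
    · rintro (((h | rfl) | rfl) | rfl)
      · exact absurd h hemp
      · tauto
      · simp
      · simp
    · intro h
      rcases h with h | h
      · rcases h with rfl; tauto
      · by_cases h2 : (2 : Int) = x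
        · subst h2; tauto
        · by_cases h3 : (3 : Int) = x
          · subst h3; tauto
          · simp [h2, h3] at h

-- ===== VERDICT (by name: the statement is the Claim_ definition above) =====
theorem kthSmallest23_spec : Claim_equal_kthSmallest23 := by
  intro k _
  unfold Spec_kthSmallest23 kthSmallest23 kthSmallest23_alt
  have hinit1 : heapPush .nil 1 = (.node 1 .nil .nil : IHeap) := by
    simp [heapPush, hMerge]
  rw [hinit1]
  by_cases hk : k > 1
  · -- first iteration of A by hand: pop 1, push 2 and 3
    rw [aLoop_cons _ _ _ _ _ hk]
    have e : pushNew (pushNew ((hMerge .nil .nil : IHeap), (Std.TreeSet.empty : Std.TreeSet Int).insert 1) (1 * 2)) (1 * 3)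
        = (IHeap.node 2 (IHeap.node 3 IHeap.nil IHeap.nil) IHeap.nil,
           (((Std.TreeSet.empty : Std.TreeSet Int).insert 1).insert (1 * 2)).insert (1 * 3)) := by
      simp [pushNew, heapPush, hMerge]
    rw [e]
    have key := loops_agree (k - 2).toNat (k - 1) (by omega) (.node 2 (.node 3 .nil .nil) .nil)
      (((Std.TreeSet.empty.insert 1).insert 2).insert 3) [1] 0 0 init_inv
    norm_num at e ⊢
    simp only [List.length_singleton, Nat.cast_one] at key
    have : (1 : Int) + (k - 1) = k := by omega
    rw [this] at key
    rw [List.getLastD_eq_getLast?] at key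
    exact key
  · rw [aLoop_stop _ _ _ hk, bLoop_stop _ _ _ _ (by simp; omega)]
    simp [hPeek]
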